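-- pv_equiv track=rewrite | github.com/robvanderleek/adventofcode | 2023/2/main.py | game_power
-- ===== SOURCE A (Python) =====
-- def game_power(game_marbles):
--     red = 0
--     green = 0
--     blue = 0
--     for marbles in game_marbles:
--         for marble in marbles:
--             [count, color] = marble.split(' ')
--             if (color == 'red' and int(count) > red):
--                 red = int(count)
--             if (color == 'green' and int(count) > green):
--                 green = int(count)
--             if (color == 'blue' and int(count) > blue):
--                 blue = int(count)
--     return red * green * blue
-- ===== SOURCE B (Python) =====
-- def game_power(game_marbles):
--     # three per-color passes with a comprehension + max, instead of one loop with three scalars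
--     def max_count(color):
--         vals = [int(cnt) for ms in game_marbles for m in ms
--                 for cnt, col in [m.split(' ')] if col == color]
--         return max([0, *vals])
--     return max_count('red') * max_count('green') * max_count('blue')
-- ===== Notes on version B (the rewrite author's own statement) =====
-- stated objective: alternative
-- what changed: Replaces the single nested loop maintaining three scalar running maxima by three independent per-color passes, each a comprehension collecting that color's parsed counts followed by max([0,*vals]).
import Mathlib
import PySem

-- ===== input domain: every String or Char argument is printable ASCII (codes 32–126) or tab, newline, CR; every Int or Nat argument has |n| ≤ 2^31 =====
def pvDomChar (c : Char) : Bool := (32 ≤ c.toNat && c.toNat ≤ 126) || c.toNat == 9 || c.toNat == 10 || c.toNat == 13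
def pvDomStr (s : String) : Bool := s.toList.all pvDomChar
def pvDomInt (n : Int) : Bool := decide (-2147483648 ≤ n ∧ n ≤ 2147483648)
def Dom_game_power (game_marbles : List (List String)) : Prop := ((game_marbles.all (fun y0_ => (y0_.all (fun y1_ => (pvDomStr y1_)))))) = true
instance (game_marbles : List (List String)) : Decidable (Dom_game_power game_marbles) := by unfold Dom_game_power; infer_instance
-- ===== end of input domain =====

-- B is an alternative decomposition: three per-color passes (comprehension + max) instead of
-- one nested loop over three scalar maxima; same complexity, no speed claim.

-- ===== PORT A =====
-- m.split(' '): sep is the nonempty literal ' ', so split? never returns none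
def pvParts (m : String) : List String := (PySem.Str.split? m " ").getD []

-- one marble step of A's inner loop: split, destructure, three guarded updates
def pvStepA (st : Int × Int × Int) (marble : String) : Int × Int × Int :=
  let parts := pvParts marble
  let count := parts.getD 0 ""
  let color := parts.getD 1 ""
  let v := (PySem.Int.ofStr? count).getD 0   -- int(count); Pre_ guarantees it parses when needed
  let red := if color = "red" ∧ v > st.1 then v else st.1
  let green := if color = "green" ∧ v > st.2.1 then v else st.2.1
  let blue := if color = "blue" ∧ v > st.2.2 then v else st.2.2
  (red, green, blue)

def game_power (game_marbles : List (List String)) : Int :=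
  let st := game_marbles.foldl (fun st marbles => marbles.foldl pvStepA st) (0, 0, 0)
  st.1 * st.2.1 * st.2.2

-- ===== PORT B =====
-- the comprehension's per-marble extractor: parsed count if the marble's color matches
def pvPick (color : String) (m : String) : Option Int :=
  let parts := pvParts m
  if parts.getD 1 "" = color then PySem.Int.ofStr? (parts.getD 0 "") else none

-- max_count(color) = max([0, *vals])
def pvMaxCount (game_marbles : List (List String)) (color : String) : Int :=
  let vals := game_marbles.flatMap (fun ms => ms.filterMap (pvPick color))
  (PySem.List.max? (0 :: vals) (fun x => x)).getD 0

def game_power_alt (game_marbles : List (List String)) : Int :=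
  pvMaxCount game_marbles "red" * pvMaxCount game_marbles "green" * pvMaxCount game_marbles "blue"

-- ===== PRECONDITION & SPEC =====
-- A raises on a marble whose split(' ') does not have exactly 2 parts (ValueError on unpacking)
-- or whose color is red/green/blue with an unparsable count (int() ValueError); Pre_ excludes exactly those.
def pvMarbleOK (m : String) : Bool :=
  let parts := pvParts m
  parts.length == 2 &&
  (!(parts.getD 1 "" == "red" || parts.getD 1 "" == "green" || parts.getD 1 "" == "blue")
    || (PySem.Int.ofStr? (parts.getD 0 "")).isSome)

def Pre_game_power (game_marbles : List (List String)) : Prop :=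
  game_marbles.all (fun ms => ms.all pvMarbleOK) = true
instance (game_marbles : List (List String)) : Decidable (Pre_game_power game_marbles) := by
  unfold Pre_game_power; infer_instance

def pvWitness_game_power : List (List String) :=
  [["3 red", "5 green"], ["2 blue", "7 red", "1 purple"]]

def Spec_game_power (game_marbles : List (List String)) (out : Int) : Prop := out = game_power_alt game_marbles
instance (game_marbles : List (List String)) (out : Int) : Decidable (Spec_game_power game_marbles out) := by unfold Spec_game_power; infer_instance

-- ===== CLAIM (what is proved, stated in full; the proofs are below) =====
def Claim_equal_game_power : Prop := ∀ (game_marbles : List (List String)), Dom_game_power game_marbles → Pre_game_power game_marbles → Spec_game_power game_marbles (game_power game_marbles)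

-- ===== LEMMAS AND PROOFS =====

-- running max over the values extracted by pvPick c
def pvMFold (c : String) (a : Int) (ms : List String) : Int :=
  (ms.filterMap (pvPick c)).foldl max a

theorem pvMFold_nil (c : String) (a : Int) : pvMFold c a [] = a := rfl

theorem pvMFold_cons (c : String) (a : Int) (m : String) (ms : List String) :
    pvMFold c a (m :: ms) =
      pvMFold c (match pvPick c m with | some v => max a v | none => a) ms := by
  unfold pvMFold
  cases h : pvPick c m <;> simp [h]

theorem pvMFold_append (c : String) (a : Int) (xs ys : List String) :
    pvMFold c a (xs ++ ys) = pvMFold c (pvMFold c a xs) ys := by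
  unfold pvMFold; simp [List.filterMap_append, List.foldl_append]

theorem pvStepA_eq (m : String) (r g b : Int) (h : pvMarbleOK m = true) :
    pvStepA (r, g, b) m =
      ((match pvPick "red" m with | some v => max r v | none => r),
       (match pvPick "green" m with | some v => max g v | none => g),
       (match pvPick "blue" m with | some v => max b v | none => b)) := by
  unfold pvStepA pvPick
  simp only [pvMarbleOK, Bool.and_eq_true, Bool.or_eq_true, beq_iff_eq,
    Bool.not_eq_true'] at h
  obtain ⟨-, h2⟩ := h
  by_cases hr : (pvParts m).getD 1 "" = "red" <;>
  by_cases hg : (pvParts m).getD 1 "" = "green" <;>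
  by_cases hb : (pvParts m).getD 1 "" = "blue" <;>
    simp_all <;>
    cases hp : PySem.Int.ofStr? ((pvParts m).getD 0 "") <;>
    simp_all [Int.max_def] <;> split_ifs <;> omega

theorem pvInner (ms : List String) (r g b : Int) (h : ms.all pvMarbleOK = true) :
    ms.foldl pvStepA (r, g, b) = (pvMFold "red" r ms, pvMFold "green" g ms, pvMFold "blue" b ms) := by
  induction ms generalizing r g b with
  | nil => simp [pvMFold_nil]
  | cons m t ih =>
    simp only [List.all_cons, Bool.and_eq_true] at h
    rw [List.foldl_cons, pvStepA_eq m r g b h.1, ih _ _ _ h.2,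
      pvMFold_cons "red" r m t, pvMFold_cons "green" g m t, pvMFold_cons "blue" b m t]

theorem pvOuter (gm : List (List String)) (r g b : Int)
    (h : gm.all (fun ms => ms.all pvMarbleOK) = true) :
    gm.foldl (fun st marbles => marbles.foldl pvStepA st) (r, g, b) =
      (pvMFold "red" r (gm.flatMap id), pvMFold "green" g (gm.flatMap id),
       pvMFold "blue" b (gm.flatMap id)) := by
  induction gm generalizing r g b with
  | nil => simp [pvMFold_nil]
  | cons ms t ih =>
    simp only [List.all_cons, Bool.and_eq_true] at h
    rw [List.foldl_cons, pvInner ms r g b h.1]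
    rw [ih _ _ _ h.2]
    simp [List.flatMap_cons, pvMFold_append, id]

theorem pvMaxCount_eq (gm : List (List String)) (c : String) :
    pvMaxCount gm c = pvMFold c 0 (gm.flatMap id) := by
  simp only [pvMaxCount, pvMFold]
  rw [PySem.List.max?_id_cons]
  simp [List.flatMap_def]

-- ===== VERDICT (by name: the statement is the Claim_ definition above) =====
theorem game_power_spec : Claim_equal_game_power := by
  intro gm _ hpre
  unfold Spec_game_power game_power game_power_alt
  rw [pvOuter gm 0 0 0 hpre, pvMaxCount_eq gm "red", pvMaxCount_eq gm "green",
    pvMaxCount_eq gm "blue"]
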